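-- pv_equiv track=rewrite | github.com/jampick/rando | MoonTide/wrath_manager/test_discord_formatting.py | _categorize_settings
-- ===== SOURCE A (Python) =====
-- def _categorize_settings(settings):
--     """Categorize settings into logical groups for better readability."""
--     categories = {
--         "Combat": {},
--         "Resources": {},
--         "Player": {},
--         "World": {},
--         "Other": {}
--     }
--
--     for key, value in settings.items():
--         if any(combat_key in key.lower() for combat_key in ["damage", "health", "aggro", "purge", "thrall"]):
--             categories["Combat"][key] = value
--         elif any(resource_key in key.lower() for resource_key in ["harvest", "spawn", "respawn"]):
--             categories["Resources"][key] = value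
--         elif any(player_key in key.lower() for player_key in ["player", "stamina", "regeneration"]):
--             categories["Player"][key] = value
--         elif any(world_key in key.lower() for world_key in ["storm", "elder", "visibility", "range"]):
--             categories["World"][key] = value
--         else:
--             categories["Other"][key] = value
--
--     # Remove empty categories
--     return {k: v for k, v in categories.items() if v}
-- ===== SOURCE B (Python) =====
-- CATEGORIES = [
--     ("Combat", ["damage", "health", "aggro", "purge", "thrall"]),
--     ("Resources", ["harvest", "spawn", "respawn"]),
--     ("Player", ["player", "stamina", "regeneration"]),
--     ("World", ["storm", "elder", "visibility", "range"]),
-- ]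
--
--
-- def _category_of(key):
--     kl = key.lower()
--     return next((name for name, kws in CATEGORIES if any(kw in kl for kw in kws)), "Other")
--
--
-- def _categorize_settings(settings):
--     result = {}
--     for name in [n for n, _ in CATEGORIES] + ["Other"]:
--         group = {k: v for k, v in settings.items() if _category_of(k) == name}
--         if group:
--             result[name] = group
--     return result
-- ===== Notes on version B (the rewrite author's own statement) =====
-- stated objective: idiomatic
-- what changed: A's if/elif chain filling five hand-named bucket dicts in one pass is replaced by an ordered keyword table with a first-match category lookup and one dict-comprehension pass per category over the preserved category order.
import Mathlib
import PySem

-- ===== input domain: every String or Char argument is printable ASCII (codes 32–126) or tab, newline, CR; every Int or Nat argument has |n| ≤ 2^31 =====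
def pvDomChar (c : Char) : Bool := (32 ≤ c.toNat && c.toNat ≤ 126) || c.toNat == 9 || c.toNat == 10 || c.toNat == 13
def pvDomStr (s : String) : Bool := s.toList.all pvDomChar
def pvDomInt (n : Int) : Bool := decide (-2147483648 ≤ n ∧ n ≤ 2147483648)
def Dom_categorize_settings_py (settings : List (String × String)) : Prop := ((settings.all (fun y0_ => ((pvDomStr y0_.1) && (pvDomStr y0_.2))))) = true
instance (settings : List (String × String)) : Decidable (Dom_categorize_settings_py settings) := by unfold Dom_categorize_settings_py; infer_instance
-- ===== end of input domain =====

-- B replaces A's if/elif keyword chain and five named buckets by an ordered keyword table with a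
-- first-match category lookup and one dict-comprehension pass per category (idiomatic; not faster).


-- ===== PORT A =====
-- one loop step of A; state = the five category dicts (Combat, Resources, Player, World, Other)
def pvStepA (cats : PySem.Dict String String × PySem.Dict String String × PySem.Dict String String ×
    PySem.Dict String String × PySem.Dict String String) (kv : String × String) :
    PySem.Dict String String × PySem.Dict String String × PySem.Dict String String ×
    PySem.Dict String String × PySem.Dict String String :=
  let (combat, resources, player, world, other) := cats
  let (key, value) := kv
  if ["damage", "health", "aggro", "purge", "thrall"].any
      (fun combat_key => PySem.Str.isIn combat_key (PySem.Str.lower key)) then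
    (combat.insert key value, resources, player, world, other)
  else if ["harvest", "spawn", "respawn"].any
      (fun resource_key => PySem.Str.isIn resource_key (PySem.Str.lower key)) then
    (combat, resources.insert key value, player, world, other)
  else if ["player", "stamina", "regeneration"].any
      (fun player_key => PySem.Str.isIn player_key (PySem.Str.lower key)) then
    (combat, resources, player.insert key value, world, other)
  else if ["storm", "elder", "visibility", "range"].any
      (fun world_key => PySem.Str.isIn world_key (PySem.Str.lower key)) then
    (combat, resources, player, world.insert key value, other)
  else
    (combat, resources, player, world, other.insert key value)

def categorize_settings_py (settings : List (String × String)) : List (String × List (String × String)) :=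
  let cats := settings.foldl pvStepA
    (PySem.Dict.empty, PySem.Dict.empty, PySem.Dict.empty, PySem.Dict.empty, PySem.Dict.empty)
  -- return {k: v for k, v in categories.items() if v}
  ([("Combat", cats.1), ("Resources", cats.2.1), ("Player", cats.2.2.1),
    ("World", cats.2.2.2.1), ("Other", cats.2.2.2.2)].filter
      (fun kv => !kv.2.items.isEmpty)).map (fun kv => (kv.1, kv.2.items))

-- ===== PORT B =====
def pvCATEGORIES : List (String × List String) :=
  [("Combat", ["damage", "health", "aggro", "purge", "thrall"]),
   ("Resources", ["harvest", "spawn", "respawn"]),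
   ("Player", ["player", "stamina", "regeneration"]),
   ("World", ["storm", "elder", "visibility", "range"])]

-- first table entry one of whose keywords is a substring of the lowered key, else "Other"
def pvCategoryOf (key : String) : String :=
  let kl := PySem.Str.lower key
  ((pvCATEGORIES.find? (fun c => c.2.any (fun kw => PySem.Str.isIn kw kl))).map Prod.fst).getD "Other"

def categorize_settings_py_alt (settings : List (String × String)) : List (String × List (String × String)) :=
  (pvCATEGORIES.map Prod.fst ++ ["Other"]).foldl
    (fun result name =>
      let group := PySem.Dict.ofList (settings.filter (fun kv => pvCategoryOf kv.1 == name))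
      if group.items.isEmpty then result else result ++ [(name, group.items)])
    []

-- ===== PRECONDITION & SPEC =====
def Spec_categorize_settings_py (settings : List (String × String)) (out : List (String × List (String × String))) : Prop := out = categorize_settings_py_alt settings
instance (settings : List (String × String)) (out : List (String × List (String × String))) : Decidable (Spec_categorize_settings_py settings out) := by unfold Spec_categorize_settings_py; infer_instance

-- ===== CLAIM (what is proved, stated in full; the proofs are below) =====
def Claim_equal_categorize_settings_py : Prop := ∀ (settings : List (String × String)), Dom_categorize_settings_py settings → Spec_categorize_settings_py settings (categorize_settings_py settings)

-- ===== LEMMAS AND PROOFS =====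

-- B's table lookup written as A's if/elif chain of keyword tests
theorem pvCategoryOf_eq_chain (key : String) : pvCategoryOf key =
    if ["damage", "health", "aggro", "purge", "thrall"].any
        (fun combat_key => PySem.Str.isIn combat_key (PySem.Str.lower key)) then "Combat"
    else if ["harvest", "spawn", "respawn"].any
        (fun resource_key => PySem.Str.isIn resource_key (PySem.Str.lower key)) then "Resources"
    else if ["player", "stamina", "regeneration"].any
        (fun player_key => PySem.Str.isIn player_key (PySem.Str.lower key)) then "Player"
    else if ["storm", "elder", "visibility", "range"].any
        (fun world_key => PySem.Str.isIn world_key (PySem.Str.lower key)) then "World"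
    else "Other" := by
  cases h1 : ["damage", "health", "aggro", "purge", "thrall"].any
      (fun combat_key => PySem.Str.isIn combat_key (PySem.Str.lower key)) <;>
  cases h2 : ["harvest", "spawn", "respawn"].any
      (fun resource_key => PySem.Str.isIn resource_key (PySem.Str.lower key)) <;>
  cases h3 : ["player", "stamina", "regeneration"].any
      (fun player_key => PySem.Str.isIn player_key (PySem.Str.lower key)) <;>
  cases h4 : ["storm", "elder", "visibility", "range"].any
      (fun world_key => PySem.Str.isIn world_key (PySem.Str.lower key)) <;>
  simp only [pvCategoryOf, pvCATEGORIES, List.find?_cons, h1, h2, h3, h4, Option.map_some,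
    Option.map_none, Option.getD_some, Option.getD_none, List.find?_nil] <;> simp

-- inserting a pair into one category's bucket exactly when it belongs there
def pvIns (name : String) (d : PySem.Dict String String) (kv : String × String) : PySem.Dict String String :=
  if pvCategoryOf kv.1 == name then d.insert kv.1 kv.2 else d

-- A's single fold over five dicts distributes into five independent bucket folds
theorem foldA_gen (settings : List (String × String)) :
    ∀ (c r p w o : PySem.Dict String String),
    settings.foldl pvStepA (c, r, p, w, o) =
      (settings.foldl (pvIns "Combat") c, settings.foldl (pvIns "Resources") r,
       settings.foldl (pvIns "Player") p, settings.foldl (pvIns "World") w,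
       settings.foldl (pvIns "Other") o) := by
  induction settings with
  | nil => intro c r p w o; rfl
  | cons kv t ih =>
      intro c r p w o
      obtain ⟨key, value⟩ := kv
      simp only [List.foldl_cons]
      cases h1 : ["damage", "health", "aggro", "purge", "thrall"].any
          (fun combat_key => PySem.Str.isIn combat_key (PySem.Str.lower key)) <;>
      cases h2 : ["harvest", "spawn", "respawn"].any
          (fun resource_key => PySem.Str.isIn resource_key (PySem.Str.lower key)) <;>
      cases h3 : ["player", "stamina", "regeneration"].any
          (fun player_key => PySem.Str.isIn player_key (PySem.Str.lower key)) <;>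
      cases h4 : ["storm", "elder", "visibility", "range"].any
          (fun world_key => PySem.Str.isIn world_key (PySem.Str.lower key)) <;>
      simp only [pvStepA, h1, h2, h3, h4, if_true, if_false, Bool.false_eq_true] <;>
      rw [ih] <;>
      simp only [pvIns, pvCategoryOf_eq_chain, h1, h2, h3, h4, if_true, if_false,
        Bool.false_eq_true, String.reduceBEq]

-- dict(pairs) is the insert-fold
theorem dict_ofList_eq_foldl {κ ν : Type} [BEq κ] (l : List (κ × ν)) :
    PySem.Dict.ofList l = l.foldl (fun d kv => d.insert kv.1 kv.2) PySem.Dict.empty := by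
  have h : ∀ (d : PySem.Dict κ ν), d.update l = l.foldl (fun d kv => d.insert kv.1 kv.2) d := by
    induction l with
    | nil => intro d; rfl
    | cons h t ih => intro d; simp [PySem.Dict.update, List.foldl] at *
  exact h _

-- a bucket fold is B's dict comprehension for that category
theorem bucket_eq (settings : List (String × String)) (name : String) :
    settings.foldl (pvIns name) PySem.Dict.empty =
      PySem.Dict.ofList (settings.filter (fun kv => pvCategoryOf kv.1 == name)) := by
  rw [dict_ofList_eq_foldl, ← PySem.List.foldl_if_eq_foldl_filter]
  rfl

-- ===== VERDICT (by name: the statement is the Claim_ definition above) =====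
theorem categorize_settings_py_spec : Claim_equal_categorize_settings_py := by
  intro settings _
  unfold Spec_categorize_settings_py categorize_settings_py categorize_settings_py_alt
  rw [foldA_gen]
  simp only [bucket_eq]
  cases hC : (PySem.Dict.ofList (settings.filter (fun kv => pvCategoryOf kv.1 == "Combat"))).items.isEmpty <;>
  cases hR : (PySem.Dict.ofList (settings.filter (fun kv => pvCategoryOf kv.1 == "Resources"))).items.isEmpty <;>
  cases hP : (PySem.Dict.ofList (settings.filter (fun kv => pvCategoryOf kv.1 == "Player"))).items.isEmpty <;>
  cases hW : (PySem.Dict.ofList (settings.filter (fun kv => pvCategoryOf kv.1 == "World"))).items.isEmpty <;>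
  cases hO : (PySem.Dict.ofList (settings.filter (fun kv => pvCategoryOf kv.1 == "Other"))).items.isEmpty <;>
    simp at hC hR hP hW hO <;> simp [pvCATEGORIES, hC, hR, hP, hW, hO]
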